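-- pv_equiv track=rewrite | github.com/Urie96/dotfile | install.py | _match_skip_pattern
-- ===== SOURCE A (Python) =====
-- SKIP_PATTERNS = [
--     ".gitignore",
--     ".gitattributes",
--     "shell.nix",
--     ".DS_Store",
--     ".direnv/",
--     "__pycache__/",
--     ".git/",
--     ".git-crypt/",
-- ]
--
-- def _match_skip_pattern(name: str, rel_dir: str, is_dir: bool) -> bool:
--     """Check if a filesystem entry matches any SKIP_PATTERNS rule.
--
--     Args:
--         name:    basename of the entry (e.g. "__pycache__")
--         rel_dir: relative directory from SOURCE_DIR, using '/' separator
--                  (empty string for items directly under SOURCE_DIR)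
--         is_dir:  True if the entry is a directory
--     """
--     for pat in SKIP_PATTERNS:
--         dir_only = pat.endswith("/")
--         clean = pat.rstrip("/")
--
--         if dir_only and not is_dir:
--             continue
--
--         # leading '/' means anchored to SOURCE_DIR root
--         anchored = clean.startswith("/")
--         clean = clean.lstrip("/")
--
--         if "/" in clean:
--             # Path pattern
--             full_rel = f"{rel_dir}/{name}" if rel_dir else name
--             if anchored:
--                 # /a/b — only match at SOURCE_DIR root
--                 if full_rel == clean:
--                     return True
--             else:
--                 # a/b — match at any depth
--                 if full_rel == clean or full_rel.endswith("/" + clean):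
--                     return True
--         elif anchored:
--             # Anchored name — only match directly under SOURCE_DIR root
--             if rel_dir == "" and name == clean:
--                 return True
--         else:
--             # Unanchored name — match at any depth
--             if name == clean:
--                 return True
--     return False
-- ===== SOURCE B (Python) =====
-- SKIP_PATTERNS = [
--     ".gitignore",
--     ".gitattributes",
--     "shell.nix",
--     ".DS_Store",
--     ".direnv/",
--     "__pycache__/",
--     ".git/",
--     ".git-crypt/",
-- ]
--
--
-- def _classify(patterns):
--     """Split the patterns once into lookup sets plus a list of path patterns."""
--     plain, dir_only_names = set(), set()
--     anchored, anchored_dir = set(), set()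
--     path_pats = []
--     for pat in patterns:
--         dir_only = pat.endswith("/")
--         clean = pat.rstrip("/")
--         anch = clean.startswith("/")
--         clean = clean.lstrip("/")
--         if "/" in clean:
--             path_pats.append((clean, anch, dir_only))
--         elif anch:
--             (anchored_dir if dir_only else anchored).add(clean)
--         else:
--             (dir_only_names if dir_only else plain).add(clean)
--     return plain, dir_only_names, anchored, anchored_dir, path_pats
--
--
-- _PLAIN, _DIR_ONLY, _ANCHORED, _ANCHORED_DIR, _PATH_PATS = _classify(SKIP_PATTERNS)
--
--
-- def _match_skip_pattern(name: str, rel_dir: str, is_dir: bool) -> bool: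
--     if name in _PLAIN or (is_dir and name in _DIR_ONLY):
--         return True
--     if rel_dir == "" and (name in _ANCHORED or (is_dir and name in _ANCHORED_DIR)):
--         return True
--     if _PATH_PATS:
--         full_rel = f"{rel_dir}/{name}" if rel_dir else name
--         for clean, anch, dir_only in _PATH_PATS:
--             if dir_only and not is_dir:
--                 continue
--             if anch:
--                 if full_rel == clean:
--                     return True
--             elif full_rel == clean or full_rel.endswith("/" + clean):
--                 return True
--     return False
-- ===== Notes on version B (the rewrite author's own statement) =====
-- stated objective: simpler
-- what changed: B classifies SKIP_PATTERNS once at module load into lookup sets (plain names, dir-only names, anchored names, path patterns) and the per-call body is reduced to direct set membership tests plus a scan over the (here empty) path-pattern list, instead of re-parsing every pattern (endswith/rstrip/startswith/lstrip) on every call.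
import Mathlib
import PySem

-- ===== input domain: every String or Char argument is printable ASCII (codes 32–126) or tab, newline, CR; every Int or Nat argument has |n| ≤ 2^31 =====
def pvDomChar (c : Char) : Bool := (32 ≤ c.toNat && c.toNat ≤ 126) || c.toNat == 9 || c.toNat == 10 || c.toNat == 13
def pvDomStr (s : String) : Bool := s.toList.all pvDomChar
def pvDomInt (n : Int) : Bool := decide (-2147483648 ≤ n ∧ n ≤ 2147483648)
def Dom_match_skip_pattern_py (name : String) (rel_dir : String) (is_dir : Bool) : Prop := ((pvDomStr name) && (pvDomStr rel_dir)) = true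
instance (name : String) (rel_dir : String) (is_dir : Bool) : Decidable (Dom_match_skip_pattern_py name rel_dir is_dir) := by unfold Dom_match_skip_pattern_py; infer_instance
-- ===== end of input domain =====

-- B classifies SKIP_PATTERNS once into lookup sets (plain / dir-only / anchored / path patterns)
-- and decides by direct membership tests instead of re-parsing every pattern per call (objective: simpler).


-- shared exact helpers for Python's pat.rstrip("/") / pat.lstrip("/") (one-char strip set;
-- PySem.Chars.stripChars strips both sides, so these are ported by hand — exact for this use)
def pvRstripSlash (s : List Char) : List Char := (s.reverse.dropWhile (· == '/')).reverse
def pvLstripSlash (s : List Char) : List Char := s.dropWhile (· == '/')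

def pvSkipPatterns : List (List Char) :=
  [".gitignore".toList, ".gitattributes".toList, "shell.nix".toList, ".DS_Store".toList,
   ".direnv/".toList, "__pycache__/".toList, ".git/".toList, ".git-crypt/".toList]

-- ===== PORT A =====
-- one iteration of A's loop (the body of `for pat in SKIP_PATTERNS`)
def pvMatchOneA (pat : List Char) (name : List Char) (rel_dir : List Char) (is_dir : Bool) : Bool :=
  let dir_only := PySem.Chars.endswith pat ['/']
  let clean := pvRstripSlash pat
  if dir_only && !is_dir then false   -- `continue`
  else
    let anchored := PySem.Chars.startswith clean ['/']
    let clean := pvLstripSlash clean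
    if PySem.Chars.isIn ['/'] clean then
      let full_rel := if rel_dir ≠ [] then rel_dir ++ '/' :: name else name
      if anchored then full_rel == clean
      else full_rel == clean || PySem.Chars.endswith full_rel ('/' :: clean)
    else if anchored then rel_dir == ([] : List Char) && name == clean
    else name == clean

def match_skip_pattern_py (name : String) (rel_dir : String) (is_dir : Bool) : Bool :=
  pvSkipPatterns.any (fun pat => pvMatchOneA pat name.toList rel_dir.toList is_dir)

-- ===== PORT B =====
-- B's module-load classification of SKIP_PATTERNS: (plain, dir_only_names, anchored, anchored_dir, path_pats)
def pvClassify (pats : List (List Char)) :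
    PySem.Set (List Char) × PySem.Set (List Char) × PySem.Set (List Char) × PySem.Set (List Char) ×
      List (List Char × Bool × Bool) :=
  pats.foldl (fun acc pat =>
    let (plain, dirOnlyNames, anchored, anchoredDir, pathPats) := acc
    let dir_only := PySem.Chars.endswith pat ['/']
    let clean := pvRstripSlash pat
    let anch := PySem.Chars.startswith clean ['/']
    let clean := pvLstripSlash clean
    if PySem.Chars.isIn ['/'] clean then
      (plain, dirOnlyNames, anchored, anchoredDir, pathPats ++ [(clean, anch, dir_only)])
    else if anch then
      if dir_only then (plain, dirOnlyNames, anchored, PySem.Set.add anchoredDir clean, pathPats)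
      else (plain, dirOnlyNames, PySem.Set.add anchored clean, anchoredDir, pathPats)
    else if dir_only then (plain, PySem.Set.add dirOnlyNames clean, anchored, anchoredDir, pathPats)
    else (PySem.Set.add plain clean, dirOnlyNames, anchored, anchoredDir, pathPats))
    (PySem.Set.empty, PySem.Set.empty, PySem.Set.empty, PySem.Set.empty, [])

def pvIdx : PySem.Set (List Char) × PySem.Set (List Char) × PySem.Set (List Char) × PySem.Set (List Char) ×
    List (List Char × Bool × Bool) := pvClassify pvSkipPatterns

def match_skip_pattern_py_alt (name : String) (rel_dir : String) (is_dir : Bool) : Bool :=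
  let n := name.toList
  if PySem.Set.contains pvIdx.1 n || (is_dir && PySem.Set.contains pvIdx.2.1 n) then true
  else if rel_dir.toList == ([] : List Char) &&
      (PySem.Set.contains pvIdx.2.2.1 n || (is_dir && PySem.Set.contains pvIdx.2.2.2.1 n)) then true
  else if pvIdx.2.2.2.2 ≠ [] then
    let full_rel := if rel_dir.toList ≠ [] then rel_dir.toList ++ '/' :: n else n
    pvIdx.2.2.2.2.any (fun p =>
      if p.2.2 && !is_dir then false
      else if p.2.1 then full_rel == p.1
      else full_rel == p.1 || PySem.Chars.endswith full_rel ('/' :: p.1))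
  else false

-- ===== PRECONDITION & SPEC =====
def Spec_match_skip_pattern_py (name : String) (rel_dir : String) (is_dir : Bool) (out : Bool) : Prop := out = match_skip_pattern_py_alt name rel_dir is_dir
instance (name : String) (rel_dir : String) (is_dir : Bool) (out : Bool) : Decidable (Spec_match_skip_pattern_py name rel_dir is_dir out) := by unfold Spec_match_skip_pattern_py; infer_instance

-- ===== CLAIM (what is proved, stated in full; the proofs are below) =====
def Claim_equal_match_skip_pattern_py : Prop := ∀ (name : String) (rel_dir : String) (is_dir : Bool), Dom_match_skip_pattern_py name rel_dir is_dir → Spec_match_skip_pattern_py name rel_dir is_dir (match_skip_pattern_py name rel_dir is_dir)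

-- ===== LEMMAS AND PROOFS =====
theorem pv_one_plain (pat : List Char) (n r : List Char) (d : Bool)
    (h1 : PySem.Chars.endswith pat ['/'] = false)
    (h3 : PySem.Chars.startswith pat ['/'] = false)
    (h5 : PySem.Chars.isIn ['/'] pat = false)
    (h2 : pvRstripSlash pat = pat) (h4 : pvLstripSlash pat = pat) :
    pvMatchOneA pat n r d = (n == pat) := by
  simp [pvMatchOneA, h1, h2, h3, h4, h5]

theorem pv_one_dir (pat clean : List Char) (n r : List Char) (d : Bool)
    (h1 : PySem.Chars.endswith pat ['/'] = true)
    (h2 : pvRstripSlash pat = clean)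
    (h3 : PySem.Chars.startswith clean ['/'] = false)
    (h4 : pvLstripSlash clean = clean)
    (h5 : PySem.Chars.isIn ['/'] clean = false) :
    pvMatchOneA pat n r d = (d && (n == clean)) := by
  cases d <;> simp [pvMatchOneA, h1, h2, h3, h4, h5]

theorem pv_A_eq (name rel_dir : String) (is_dir : Bool) :
    match_skip_pattern_py name rel_dir is_dir =
      (name.toList == ".gitignore".toList || name.toList == ".gitattributes".toList ||
       name.toList == "shell.nix".toList || name.toList == ".DS_Store".toList ||
       is_dir && (name.toList == ".direnv".toList || name.toList == "__pycache__".toList ||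
                  name.toList == ".git".toList || name.toList == ".git-crypt".toList)) := by
  rw [match_skip_pattern_py]
  rw [show pvSkipPatterns = [".gitignore".toList, ".gitattributes".toList, "shell.nix".toList,
      ".DS_Store".toList, ".direnv/".toList, "__pycache__/".toList, ".git/".toList,
      ".git-crypt/".toList] from rfl]
  simp only [List.any_cons, List.any_nil]
  rw [pv_one_plain _ _ _ _ (by decide) (by decide) (by decide) (by decide) (by decide),
      pv_one_plain _ _ _ _ (by decide) (by decide) (by decide) (by decide) (by decide),
      pv_one_plain _ _ _ _ (by decide) (by decide) (by decide) (by decide) (by decide),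
      pv_one_plain _ _ _ _ (by decide) (by decide) (by decide) (by decide) (by decide),
      pv_one_dir _ ".direnv".toList _ _ _ (by decide) (by decide) (by decide) (by decide) (by decide),
      pv_one_dir _ "__pycache__".toList _ _ _ (by decide) (by decide) (by decide) (by decide) (by decide),
      pv_one_dir _ ".git".toList _ _ _ (by decide) (by decide) (by decide) (by decide) (by decide),
      pv_one_dir _ ".git-crypt".toList _ _ _ (by decide) (by decide) (by decide) (by decide) (by decide)]
  cases is_dir <;> simp [Bool.or_assoc]
theorem pv_idx_eq : pvIdx =
    ([".gitignore".toList, ".gitattributes".toList, "shell.nix".toList, ".DS_Store".toList],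
     [".direnv".toList, "__pycache__".toList, ".git".toList, ".git-crypt".toList],
     ([] : PySem.Set (List Char)), ([] : PySem.Set (List Char)),
     ([] : List (List Char × Bool × Bool))) := by rfl

theorem pv_B_eq (name rel_dir : String) (is_dir : Bool) :
    match_skip_pattern_py_alt name rel_dir is_dir =
      (name.toList == ".gitignore".toList || name.toList == ".gitattributes".toList ||
       name.toList == "shell.nix".toList || name.toList == ".DS_Store".toList ||
       is_dir && (name.toList == ".direnv".toList || name.toList == "__pycache__".toList ||
                  name.toList == ".git".toList || name.toList == ".git-crypt".toList)) := by
  rw [match_skip_pattern_py_alt]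
  rw [pv_idx_eq]
  cases is_dir <;> simp [PySem.Set.contains, Bool.or_assoc, Bool.beq_eq_decide_eq]

-- ===== VERDICT (by name: the statement is the Claim_ definition above) =====
theorem match_skip_pattern_py_spec : Claim_equal_match_skip_pattern_py := by
  intro name rel_dir is_dir _
  unfold Spec_match_skip_pattern_py
  rw [pv_A_eq, pv_B_eq]
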